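-- pv_equiv track=rewrite | github.com/Sveburk/masterarbeit | 3_MA_Project/Hilfs_Scripte/transkribus_to_base_schema Kopie.py | parse_custom_attributes
-- ===== SOURCE A (Python) =====
-- from typing import Dict, List, Any, Optional, Union
--
-- def parse_custom_attributes(attr_str: str) -> Dict[str, str]:
--     """
--     Parst einen String mit custom-Attributen
--
--     Args:
--         attr_str: String mit Attributen (z.B. "offset:0; length:5;")
--
--     Returns:
--         Dictionary mit den geparsten Attributen
--     """
--     result = {}
--     for part in attr_str.split(";"):
--         part = part.strip()
--         if not part:
--             continue
--
--         key_value = part.split(":", 1)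
--         if len(key_value) == 2:
--             key, value = key_value
--             result[key.strip()] = value.strip()
--
--     return result
-- ===== SOURCE B (Python) =====
-- def parse_custom_attributes(attr_str: str) -> dict:
--     # Single left-to-right character scan (no split calls): accumulate key/value
--     # buffers, a colon switches to the value buffer, a semicolon finalizes.
--     result = {}
--     key_buf = []
--     val_buf = []
--     seen_colon = False
--     for ch in attr_str + ";":
--         if ch == ";":
--             if seen_colon:
--                 result["".join(key_buf).strip()] = "".join(val_buf).strip()
--             key_buf = []
--             val_buf = []
--             seen_colon = False
--         elif ch == ":" and not seen_colon:
--             seen_colon = True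
--         elif seen_colon:
--             val_buf.append(ch)
--         else:
--             key_buf.append(ch)
--     return result
-- ===== Notes on version B (the rewrite author's own statement) =====
-- stated objective: alternative
-- what changed: A splits the string on ';' and re-splits each stripped part on ':'; B makes a single left-to-right character scan with key/value buffers and a seen-colon flag, finalizing an entry at each ';'.
import Mathlib
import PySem

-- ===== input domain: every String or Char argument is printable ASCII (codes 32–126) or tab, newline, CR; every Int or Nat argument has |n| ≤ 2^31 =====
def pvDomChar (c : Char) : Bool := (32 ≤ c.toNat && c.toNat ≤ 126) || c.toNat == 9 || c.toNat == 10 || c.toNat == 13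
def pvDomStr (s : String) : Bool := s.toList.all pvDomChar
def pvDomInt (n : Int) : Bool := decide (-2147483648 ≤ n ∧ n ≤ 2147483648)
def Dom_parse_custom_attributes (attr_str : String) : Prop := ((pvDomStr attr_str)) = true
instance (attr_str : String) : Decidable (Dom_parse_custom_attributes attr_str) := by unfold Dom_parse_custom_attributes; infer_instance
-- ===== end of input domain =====

-- B replaces A's two nested split passes (split on ';', then split each part on ':')
-- by one left-to-right character scan with key/value buffers (objective: alternative
-- single-pass decomposition, similar cost).

-- ===== PORT A =====
-- per-part body of A's loop: strip, skip empties, split at the first ':'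
def pcaPartA (result : PySem.Dict String String) (part : String) : PySem.Dict String String :=
  let part := PySem.Str.strip part
  if part = "" then result
  else
    -- '.getD []' only unwraps the Option: the separators are the literals ";"/":" ≠ "", so split?/splitMax? are always 'some'
    let key_value := (PySem.Str.splitMax? part ":" 1).getD []
    match key_value with
    | [key, value] => result.insert (PySem.Str.strip key) (PySem.Str.strip value)
    | _ => result

def parse_custom_attributes (attr_str : String) : List (String × String) :=
  (((PySem.Str.split? attr_str ";").getD []).foldl pcaPartA PySem.Dict.empty).items

-- ===== PORT B =====
-- one step of B's character scan; state = (result, key_buf, val_buf, seen_colon)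
def pcaStep (st : PySem.Dict String String × List Char × List Char × Bool) (ch : Char) :
    PySem.Dict String String × List Char × List Char × Bool :=
  let (result, key_buf, val_buf, seen_colon) := st
  if ch = ';' then
    (if seen_colon then
        result.insert (String.ofList (PySem.Chars.strip key_buf)) (String.ofList (PySem.Chars.strip val_buf))
      else result,
     [], [], false)
  else if ch = ':' && !seen_colon then (result, key_buf, val_buf, true)
  else if seen_colon then (result, key_buf, val_buf ++ [ch], seen_colon)
  else (result, key_buf ++ [ch], val_buf, seen_colon)

def parse_custom_attributes_alt (attr_str : String) : List (String × String) :=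
  ((attr_str.toList ++ [';']).foldl pcaStep (PySem.Dict.empty, [], [], false)).1.items

-- ===== PRECONDITION & SPEC =====
def Spec_parse_custom_attributes (attr_str : String) (out : List (String × String)) : Prop := out = parse_custom_attributes_alt attr_str
instance (attr_str : String) (out : List (String × String)) : Decidable (Spec_parse_custom_attributes attr_str out) := by unfold Spec_parse_custom_attributes; infer_instance

-- ===== CLAIM (what is proved, stated in full; the proofs are below) =====
def Claim_equal_parse_custom_attributes : Prop := ∀ (attr_str : String), Dom_parse_custom_attributes attr_str → Spec_parse_custom_attributes attr_str (parse_custom_attributes attr_str)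

-- ===== LEMMAS AND PROOFS =====

-- proof-side recursive description of splitting at ';' (cur = segment prefix read so far)
def pcaSp (l : List Char) (cur : List Char) : List (List Char) :=
  match l with
  | [] => [cur]
  | c :: r => if c = ';' then cur :: pcaSp r [] else pcaSp r (cur ++ [c])

-- A's per-part body moved to List Char
def pcaPartC (result : PySem.Dict String String) (seg : List Char) : PySem.Dict String String :=
  let p := PySem.Chars.strip seg
  if p = [] then result
  else
    match PySem.Chars.splitOnMax p [':'] 1 with
    | [key, value] => result.insert (String.ofList (PySem.Chars.strip key)) (String.ofList (PySem.Chars.strip value))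
    | _ => result

lemma pca_splitOn_go (l : List Char) : ∀ (fuel : Nat), l.length ≤ fuel → ∀ (cur : List Char) (acc : List (List Char)),
    PySem.Chars.splitOn.go [';'] fuel l cur acc = acc.reverse ++ pcaSp l cur.reverse := by
  induction l with
  | nil =>
    intro fuel _ cur acc
    cases fuel <;> simp [PySem.Chars.splitOn.go, pcaSp]
  | cons c r ih =>
    intro fuel hf cur acc
    cases fuel with
    | zero => simp at hf
    | succ f =>
      by_cases hc : c = ';'
      · subst hc
        simp [PySem.Chars.splitOn.go, pcaSp, List.isPrefixOf, ih f (by simpa using hf) [] (cur.reverse :: acc)]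
      · simp [PySem.Chars.splitOn.go, pcaSp, List.isPrefixOf, hc, Ne.symm hc, ih f (by simpa using hf) (c :: cur) acc]

lemma pca_splitOn_eq (cs : List Char) : PySem.Chars.splitOn cs [';'] = pcaSp cs [] := by
  simpa using pca_splitOn_go cs (cs.length + 1) (by omega) [] []

lemma pca_goMax_zero (fuel : Nat) (l cur : List Char) (acc : List (List Char)) :
    PySem.Chars.splitOnMax.go [':'] fuel 0 l cur acc = ((cur.reverse ++ l) :: acc).reverse := by
  cases fuel <;> cases l <;> simp [PySem.Chars.splitOnMax.go]

lemma pca_goMax_no (l : List Char) : ∀ (fuel : Nat), l.length ≤ fuel → ':' ∉ l → ∀ (cur : List Char) (acc : List (List Char)),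
    PySem.Chars.splitOnMax.go [':'] fuel 1 l cur acc = acc.reverse ++ [cur.reverse ++ l] := by
  induction l with
  | nil => intro fuel _ _ cur acc; cases fuel <;> simp [PySem.Chars.splitOnMax.go]
  | cons c r ih =>
    intro fuel hf hm cur acc
    cases fuel with
    | zero => simp at hf
    | succ f =>
      have hc : c ≠ ':' := fun h => hm (h ▸ List.mem_cons_self ..)
      simp [PySem.Chars.splitOnMax.go, List.isPrefixOf, Ne.symm hc,
        ih f (by simpa using hf) (fun h => hm (List.mem_cons_of_mem _ h)) (c :: cur) acc]

lemma pca_goMax_yes (a : List Char) : ∀ (b : List Char) (fuel : Nat), (a ++ ':' :: b).length ≤ fuel → ':' ∉ a →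
    ∀ (cur : List Char) (acc : List (List Char)),
    PySem.Chars.splitOnMax.go [':'] fuel 1 (a ++ ':' :: b) cur acc = acc.reverse ++ [cur.reverse ++ a, b] := by
  induction a with
  | nil =>
    intro b fuel hf _ cur acc
    cases fuel with
    | zero => simp at hf
    | succ f => simp [PySem.Chars.splitOnMax.go, List.isPrefixOf, pca_goMax_zero]
  | cons c r ih =>
    intro b fuel hf hm cur acc
    cases fuel with
    | zero => simp at hf
    | succ f =>
      have hc : c ≠ ':' := fun h => hm (h ▸ List.mem_cons_self ..)
      simp [PySem.Chars.splitOnMax.go, List.isPrefixOf, Ne.symm hc,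
        ih b f (by simpa using hf) (fun h => hm (List.mem_cons_of_mem _ h)) (c :: cur) acc]

lemma pca_splitMax_no (l : List Char) (h : ':' ∉ l) : PySem.Chars.splitOnMax l [':'] 1 = [l] := by
  simp [PySem.Chars.splitOnMax]
  simpa using pca_goMax_no l (l.length + 1) (by omega) h [] []

lemma pca_splitMax_yes (a b : List Char) (h : ':' ∉ a) :
    PySem.Chars.splitOnMax (a ++ ':' :: b) [':'] 1 = [a, b] := by
  simp [PySem.Chars.splitOnMax]
  simpa using pca_goMax_yes a b ((a ++ ':' :: b).length + 1) (by omega) h [] []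

lemma pca_lstrip_append (a : List Char) (c : Char) (b : List Char) (hc : PySem.Chars.isspace c = false) :
    PySem.Chars.lstrip (a ++ c :: b) = PySem.Chars.lstrip a ++ c :: b := by
  simp [PySem.Chars.lstrip, List.dropWhile_append]
  intro h
  simp_all [List.dropWhile, List.dropWhile_eq_nil_iff.2 h]

lemma pca_rstrip_append (a : List Char) (c : Char) (b : List Char) (hc : PySem.Chars.isspace c = false) :
    PySem.Chars.rstrip (a ++ c :: b) = a ++ c :: PySem.Chars.rstrip b := by
  simp only [PySem.Chars.rstrip, List.reverse_append, List.reverse_cons]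
  have h := pca_lstrip_append b.reverse c a.reverse hc
  simp only [PySem.Chars.lstrip] at h
  rw [show b.reverse ++ [c] ++ a.reverse = b.reverse ++ c :: a.reverse by simp, h]
  simp

lemma pca_strip_colon (kb vb : List Char) :
    PySem.Chars.strip (kb ++ ':' :: vb) = PySem.Chars.lstrip kb ++ ':' :: PySem.Chars.rstrip vb := by
  have hc : PySem.Chars.isspace ':' = false := by decide
  rw [PySem.Chars.strip, pca_lstrip_append kb ':' vb hc, pca_rstrip_append _ ':' vb hc]

lemma pca_strip_lstrip (l : List Char) : PySem.Chars.strip (PySem.Chars.lstrip l) = PySem.Chars.strip l := by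
  simp [PySem.Chars.strip, PySem.Chars.lstrip, List.dropWhile_idempotent]

lemma pca_lstrip_rstrip (l : List Char) :
    PySem.Chars.lstrip (PySem.Chars.rstrip l) = PySem.Chars.rstrip (PySem.Chars.lstrip l) := by
  induction l with
  | nil => simp [PySem.Chars.lstrip, PySem.Chars.rstrip]
  | cons c r ih =>
    by_cases hc : PySem.Chars.isspace c
    · by_cases hr : List.dropWhile PySem.Chars.isspace r.reverse = []
      · simp [PySem.Chars.lstrip, PySem.Chars.rstrip, List.dropWhile, hc, List.dropWhile_append, hr] at ih ⊢
        simpa [hr] using ih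
      · simp [PySem.Chars.lstrip, PySem.Chars.rstrip, List.dropWhile, hc, List.dropWhile_append, hr] at ih ⊢
        simpa [hr, hc] using ih
    · simp [PySem.Chars.lstrip, PySem.Chars.rstrip, List.dropWhile, hc, List.dropWhile_append]
      intro h
      split <;> simp_all

lemma pca_strip_rstrip (l : List Char) : PySem.Chars.strip (PySem.Chars.rstrip l) = PySem.Chars.strip l := by
  rw [PySem.Chars.strip, pca_lstrip_rstrip, PySem.Chars.strip]
  simp [PySem.Chars.rstrip, List.dropWhile_idempotent]

lemma pca_mem_strip {x : Char} {l : List Char} (h : x ∈ PySem.Chars.strip l) : x ∈ l := by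
  simp only [PySem.Chars.strip, PySem.Chars.rstrip, PySem.Chars.lstrip, List.mem_reverse] at h
  exact (List.dropWhile_sublist _).mem ((List.mem_reverse).1 ((List.dropWhile_sublist _).mem h))

lemma pca_mem_lstrip {x : Char} {l : List Char} (h : x ∈ PySem.Chars.lstrip l) : x ∈ l :=
  (List.dropWhile_sublist _).mem h

lemma pcaPartA_ofList (d : PySem.Dict String String) (seg : List Char) :
    pcaPartA d (String.ofList seg) = pcaPartC d seg := by
  unfold pcaPartA pcaPartC
  have hs : PySem.Str.strip (String.ofList seg) = String.ofList (PySem.Chars.strip seg) := by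
    simp [PySem.Str.strip]
  rw [hs]
  by_cases he : PySem.Chars.strip seg = []
  · simp [he]
  · rw [if_neg (by simpa using he), if_neg he]
    have hm : PySem.Str.splitMax? (String.ofList (PySem.Chars.strip seg)) ":" 1 =
        some ((PySem.Chars.splitOnMax (PySem.Chars.strip seg) [':'] 1).map String.ofList) := by
      simp [PySem.Str.splitMax?, PySem.Chars.splitMax?]
    rw [hm]
    rcases hsp : PySem.Chars.splitOnMax (PySem.Chars.strip seg) [':'] 1 with _ | ⟨a, _ | ⟨b, _ | ⟨c, rest⟩⟩⟩ <;>
      simp [PySem.Str.strip]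

-- the full segment a pending B-state represents
def pcaPend (seen : Bool) (kb vb : List Char) : List Char :=
  if seen then kb ++ ':' :: vb else kb

lemma pca_fin (d : PySem.Dict String String) (seen : Bool) (kb vb : List Char) (hk : ':' ∉ kb) :
    pcaPartC d (pcaPend seen kb vb) =
      if seen then d.insert (String.ofList (PySem.Chars.strip kb)) (String.ofList (PySem.Chars.strip vb)) else d := by
  cases seen with
  | false =>
    simp only [pcaPend, if_false, Bool.false_eq_true, pcaPartC]
    by_cases he : PySem.Chars.strip kb = []
    · simp [he]
    · rw [if_neg he, pca_splitMax_no _ (fun h => hk (pca_mem_strip h))]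
  | true =>
    simp only [pcaPend, if_true, pcaPartC]
    rw [pca_strip_colon kb vb]
    rw [if_neg (by simp)]
    rw [pca_splitMax_yes _ _ (fun h => hk (pca_mem_lstrip h))]
    simp [pca_strip_lstrip, pca_strip_rstrip]

lemma pca_main (l : List Char) : ∀ (d : PySem.Dict String String) (kb vb : List Char) (seen : Bool),
    ':' ∉ kb → (seen = false → vb = []) →
    (l ++ [';']).foldl pcaStep (d, kb, vb, seen) =
      (List.foldl pcaPartC d (pcaSp l (pcaPend seen kb vb)), [], [], false) := by
  induction l with
  | nil =>
    intro d kb vb seen hk _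
    simp [pcaStep, pcaSp, pca_fin d seen kb vb hk]
  | cons c r ih =>
    intro d kb vb seen hk hv
    by_cases hc : c = ';'
    · subst hc
      simp only [List.cons_append, List.foldl_cons]
      rw [show pcaStep (d, kb, vb, seen) ';' =
            (if seen then d.insert (String.ofList (PySem.Chars.strip kb)) (String.ofList (PySem.Chars.strip vb)) else d,
             [], [], false) by simp [pcaStep]]
      rw [ih _ [] [] false (by simp) (fun _ => rfl)]
      have hfin := pca_fin d seen kb vb hk
      simp only [pcaPend] at hfin
      simp [pcaSp, pcaPend, hfin]
    · by_cases h2 : c = ':' ∧ seen = false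
      · obtain ⟨hcc, hsf⟩ := h2
        subst hcc hsf
        simp only [List.cons_append, List.foldl_cons]
        rw [show pcaStep (d, kb, vb, false) ':' = (d, kb, vb, true) by simp [pcaStep]]
        rw [ih _ kb vb true hk (by simp)]
        simp [pcaSp, pcaPend, hv rfl]
      · cases seen with
        | true =>
          simp only [List.cons_append, List.foldl_cons]
          rw [show pcaStep (d, kb, vb, true) c = (d, kb, vb ++ [c], true) by simp [pcaStep, hc]]
          rw [ih _ kb (vb ++ [c]) true hk (by simp)]
          simp [pcaSp, pcaPend, hc]
        | false =>
          have hcc : c ≠ ':' := fun h => h2 ⟨h, rfl⟩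
          simp only [List.cons_append, List.foldl_cons]
          rw [show pcaStep (d, kb, vb, false) c = (d, kb ++ [c], vb, false) by simp [pcaStep, hc, hcc]]
          rw [ih _ (kb ++ [c]) vb false (by simp [hk, Ne.symm hcc]) hv]
          simp [pcaSp, pcaPend, hc]

lemma pca_foldl_map (l : List (List Char)) (d : PySem.Dict String String) :
    (l.map String.ofList).foldl pcaPartA d = l.foldl pcaPartC d := by
  induction l generalizing d with
  | nil => rfl
  | cons s r ih => simp [pcaPartA_ofList, ih]

-- ===== VERDICT (by name: the statement is the Claim_ definition above) =====
theorem parse_custom_attributes_spec : Claim_equal_parse_custom_attributes := by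
  intro attr_str _
  unfold Spec_parse_custom_attributes parse_custom_attributes parse_custom_attributes_alt
  have hA : (PySem.Str.split? attr_str ";").getD [] = (pcaSp attr_str.toList []).map String.ofList := by
    simp [PySem.Str.split?, PySem.Chars.split?, pca_splitOn_eq]
  rw [hA, pca_foldl_map,
    pca_main attr_str.toList PySem.Dict.empty [] [] false (by simp) (fun _ => rfl)]
  rfl
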